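-- pv_equiv track=rewrite | github.com/ananta888/ananta | agent/services/doom_loop_service.py | _max_repeated_tool_calls
-- ===== SOURCE A (Python) =====
-- from typing import Any
--
-- def _max_repeated_tool_calls(signals: list[dict[str, Any]]) -> int:
--     current = 0
--     maximum = 0
--     previous_signature: str | None = None
--     for signal in signals:
--         if str(signal.get("action_type") or "").strip().lower() != "tool_call":
--             previous_signature = None
--             current = 0
--             continue
--         signature = str(signal.get("action_signature") or "").strip().lower()
--         if not signature:
--             previous_signature = None
--             current = 0
--             continue
--         if signature == previous_signature:
--             current += 1
--         else:
--             previous_signature = signature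
--             current = 1
--         maximum = max(maximum, current)
--     return maximum
-- ===== SOURCE B (Python) =====
-- def _key(sig):
--     """Normalized run key: None breaks runs (non-tool_call or empty signature)."""
--     if str(sig.get("action_type") or "").strip().lower() != "tool_call":
--         return None
--     return str(sig.get("action_signature") or "").strip().lower() or None
--
--
-- def _solve(ks):
--     """Divide and conquer on a non-empty key list: returns
--     (best run, prefix run, suffix run, first key, last key),
--     where runs count only consecutive equal non-None keys."""
--     if len(ks) == 1:
--         k = ks[0]
--         v = 0 if k is None else 1
--         return (v, v, v, k, k)
--     mid = len(ks) // 2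
--     L, R = ks[:mid], ks[mid:]
--     bl, pl, sl, fl, ll = _solve(L)
--     br, pr, sr, fr, lr = _solve(R)
--     cross = sl + pr if (ll is not None and ll == fr) else 0
--     pref = pl + pr if (pl == len(L) and fl == fr) else pl
--     suf = sl + sr if (sr == len(R) and lr == ll) else sr
--     return (max(bl, br, cross), pref, suf, fl, lr)
--
--
-- def _max_repeated_tool_calls(signals: list) -> int:
--     keys = [_key(s) for s in signals]
--     if not keys:
--         return 0
--     return _solve(keys)[0]
-- ===== Notes on version B (the rewrite author's own statement) =====
-- stated objective: alternative
-- what changed: Replaced A's single left-to-right scan with running counter/maximum/previous-signature state by a divide-and-conquer: map signals to run keys, recursively summarize each half as (best run, prefix run, suffix run, first key, last key) and merge the two summaries, so no sequential state is threaded through the input.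
import Mathlib
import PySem

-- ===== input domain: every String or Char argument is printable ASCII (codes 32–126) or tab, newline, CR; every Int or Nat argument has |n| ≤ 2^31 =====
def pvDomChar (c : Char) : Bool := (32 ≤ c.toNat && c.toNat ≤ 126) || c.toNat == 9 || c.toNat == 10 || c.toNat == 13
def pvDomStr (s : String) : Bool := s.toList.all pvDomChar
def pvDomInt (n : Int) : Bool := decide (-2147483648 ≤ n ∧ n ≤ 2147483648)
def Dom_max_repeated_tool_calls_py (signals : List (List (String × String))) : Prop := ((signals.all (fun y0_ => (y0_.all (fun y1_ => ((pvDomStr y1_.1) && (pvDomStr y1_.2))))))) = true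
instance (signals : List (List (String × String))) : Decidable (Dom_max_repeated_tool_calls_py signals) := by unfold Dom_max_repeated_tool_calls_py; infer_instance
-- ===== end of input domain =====

-- B replaces A's sequential counter scan by a divide-and-conquer over (best, prefix-run, suffix-run, first, last) summaries; same return value, no speed claim.

-- ===== PORT A =====
-- one iteration of A's for-loop; state = (current, maximum, previous_signature)
def pvStepA (st : Int × Int × Option String) (signal : List (String × String)) : Int × Int × Option String :=
  if PySem.Str.lower (PySem.Str.strip ((PySem.Dict.mk signal).getD "action_type" "")) ≠ "tool_call" then
    (0, st.2.1, none)
  else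
    let signature := PySem.Str.lower (PySem.Str.strip ((PySem.Dict.mk signal).getD "action_signature" ""))
    if signature = "" then
      (0, st.2.1, none)
    else
      let current := if some signature = st.2.2 then st.1 + 1 else 1
      (current, max st.2.1 current, some signature)

def max_repeated_tool_calls_py (signals : List (List (String × String))) : Int :=
  (signals.foldl pvStepA (0, 0, none)).2.1

-- ===== PORT B =====
-- _key from Source B
def pvKey (signal : List (String × String)) : Option String :=
  if PySem.Str.lower (PySem.Str.strip ((PySem.Dict.mk signal).getD "action_type" "")) ≠ "tool_call" then
    none
  else
    let s := PySem.Str.lower (PySem.Str.strip ((PySem.Dict.mk signal).getD "action_signature" ""))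
    if s = "" then none else some s

-- _solve from Source B: divide and conquer on a non-empty key list; summary =
-- (best run, prefix run, suffix run, first key, last key).  The [] case is
-- unreachable from the caller (both recursive halves are non-empty) and only
-- makes the Lean function total.
def pvSolve : List (Option String) → Int × Int × Int × Option String × Option String
  | [] => (0, 0, 0, none, none)
  | [k] => ((if k.isSome then 1 else 0), (if k.isSome then 1 else 0), (if k.isSome then 1 else 0), k, k)
  | k1 :: k2 :: rest =>
      match pvSolve ((k1 :: k2 :: rest).take ((k1 :: k2 :: rest).length / 2)),
            pvSolve ((k1 :: k2 :: rest).drop ((k1 :: k2 :: rest).length / 2)) with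
      | (bl, pl, sl, fl, ll), (br, pr, sr, fr, lr) =>
          let cross : Int := if ll.isSome ∧ ll = fr then sl + pr else 0
          let pref : Int := if pl = (((k1 :: k2 :: rest).take ((k1 :: k2 :: rest).length / 2)).length : Int) ∧ fl = fr then pl + pr else pl
          let suf : Int := if sr = (((k1 :: k2 :: rest).drop ((k1 :: k2 :: rest).length / 2)).length : Int) ∧ lr = ll then sl + sr else sr
          (max (max bl br) cross, pref, suf, fl, lr)
termination_by ks => ks.length
decreasing_by
  · simp [List.length_take]; omega
  · simp; omega

def max_repeated_tool_calls_py_alt (signals : List (List (String × String))) : Int :=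
  if (signals.map pvKey).isEmpty then 0 else (pvSolve (signals.map pvKey)).1

-- ===== PRECONDITION & SPEC =====
def Spec_max_repeated_tool_calls_py (signals : List (List (String × String))) (out : Int) : Prop := out = max_repeated_tool_calls_py_alt signals
instance (signals : List (List (String × String))) (out : Int) : Decidable (Spec_max_repeated_tool_calls_py signals out) := by unfold Spec_max_repeated_tool_calls_py; infer_instance

-- ===== CLAIM (what is proved, stated in full; the proofs are below) =====
def Claim_equal_max_repeated_tool_calls_py : Prop := ∀ (signals : List (List (String × String))), Dom_max_repeated_tool_calls_py signals → Spec_max_repeated_tool_calls_py signals (max_repeated_tool_calls_py signals)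

-- ===== LEMMAS AND PROOFS =====

-- length of the prefix run of consecutive equal non-none keys
def prefR : List (Option String) → Int
  | [] => 0
  | [k] => if k.isSome then 1 else 0
  | k :: k' :: ks => if k.isSome ∧ k' = k then 1 + prefR (k' :: ks) else (if k.isSome then 1 else 0)

theorem prefR_cons_cons (k k' : Option String) (ks : List (Option String)) :
    prefR (k :: k' :: ks) = if k.isSome ∧ k' = k then 1 + prefR (k' :: ks) else (if k.isSome then 1 else 0) := rfl

def sufR (ks : List (Option String)) : Int := prefR ks.reverse

-- best run = max over all suffixes of their prefix run
def bestR : List (Option String) → Int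
  | [] => 0
  | k :: ks => max (prefR (k :: ks)) (bestR ks)

theorem prefR_nonneg (ks : List (Option String)) : 0 ≤ prefR ks := by
  induction ks using prefR.induct <;> unfold prefR <;> (try split_ifs) <;> simp_all <;> try omega

theorem prefR_le_length (ks : List (Option String)) : prefR ks ≤ (ks.length : Int) := by
  induction ks using prefR.induct <;> unfold prefR <;> (try split_ifs) <;> simp_all <;> omega

theorem bestR_nonneg (ks : List (Option String)) : 0 ≤ bestR ks := by
  induction ks with
  | nil => simp [bestR]
  | cons k ks ih => unfold bestR; have := prefR_nonneg (k :: ks); omega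

theorem prefR_le_bestR (ks : List (Option String)) : prefR ks ≤ bestR ks := by
  cases ks with
  | nil => simp [prefR, bestR]
  | cons k ks => unfold bestR; omega

-- full-run characterizations
theorem pref_full_cons (x : Option String) (xs : List (Option String)) :
    prefR (x :: xs) = (xs.length : Int) + 1 → (x.isSome ∧ ∀ k ∈ xs, k = x) := by
  induction xs generalizing x with
  | nil =>
      intro h
      unfold prefR at h
      split at h
      · simp_all
      · simp at h
  | cons x2 xs ih =>
      intro h
      unfold prefR at h
      split at h
      · rename_i hc
        have h2 : prefR (x2 :: xs) = (xs.length : Int) + 1 := by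
          simp at h; omega
        obtain ⟨h3, h4⟩ := ih x2 h2
        refine ⟨hc.1, ?_⟩
        intro k hk
        rcases List.mem_cons.mp hk with rfl | hk
        · exact hc.2
        · exact (h4 k hk).trans hc.2
      · split at h <;> simp at h <;> omega

theorem const_prefR (x : Option String) (hx : x.isSome) :
    ∀ l : List (Option String), l ≠ [] → (∀ k ∈ l, k = x) → prefR l = (l.length : Int) := by
  intro l
  induction l with
  | nil => simp
  | cons y ys ih =>
      intro _ hall
      have hy : y = x := hall y (by simp)
      cases ys with
      | nil => subst hy; simp [prefR, hx]
      | cons y2 t =>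
          have hy2 : y2 = x := hall y2 (by simp)
          have := ih (by simp) (fun k hk => hall k (List.mem_cons_of_mem _ hk))
          unfold prefR
          rw [if_pos ⟨hy ▸ hx, hy2.trans hy.symm⟩]
          rw [this]
          simp
          omega

theorem const_getLast (x : Option String) (xs : List (Option String)) (h : ∀ k ∈ xs, k = x) :
    (x :: xs).getLast? = some x := by
  induction xs generalizing x with
  | nil => rfl
  | cons y ys ih =>
      have hy : y = x := h y (by simp)
      rw [List.getLast?_cons_cons]
      rw [ih y (fun k hk => (h k (List.mem_cons_of_mem _ hk)).trans hy.symm), hy]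

-- append lemmas
theorem prefR_append (xs ys : List (Option String)) (hx : xs ≠ []) (hy : ys ≠ []) :
    prefR (xs ++ ys) =
      if prefR xs = (xs.length : Int) ∧ xs.head? = ys.head? then (xs.length : Int) + prefR ys
      else prefR xs := by
  induction xs with
  | nil => simp at hx
  | cons x xs' ih =>
      cases xs' with
      | nil =>
          cases ys with
          | nil => simp at hy
          | cons k ys' =>
              simp only [List.cons_append, List.nil_append]
              cases x with
              | none => simp [prefR_cons_cons, show prefR [(none : Option String)] = 0 from rfl]
              | some sx =>
                  have e1 : prefR [some sx] = 1 := rfl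
                  rw [prefR_cons_cons, e1]
                  by_cases hk : k = some sx <;> simp [hk, eq_comm] <;> omega
      | cons x2 xs'' =>
          have hne : x2 :: xs'' ≠ [] := by simp
          have hlen := prefR_le_length (x2 :: xs'')
          simp only [List.cons_append]
          rw [prefR_cons_cons x x2 (xs'' ++ ys), prefR_cons_cons x x2 xs'']
          rw [show (x2 :: (xs'' ++ ys)) = (x2 :: xs'') ++ ys from rfl, ih hne]
          by_cases hc : x.isSome ∧ x2 = x
          · rw [if_pos hc, if_pos hc]
            by_cases hc2 : prefR (x2 :: xs'') = ((x2 :: xs'').length : Int) ∧ (x2 :: xs'').head? = ys.head?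
            · have hbig : (1 + prefR (x2 :: xs'') = (((x :: x2 :: xs'').length : ℕ) : Int) ∧ (x :: x2 :: xs'').head? = ys.head?) := by
                refine ⟨?_, ?_⟩
                · have := hc2.1
                  simp only [List.length_cons] at this ⊢
                  push_cast at this ⊢
                  omega
                · have h2 := hc2.2
                  simp only [List.head?_cons] at h2 ⊢
                  rw [← hc.2]
                  exact h2
              rw [if_pos hc2, if_pos hbig]
              simp only [List.length_cons]
              push_cast
              omega
            · have hbig : ¬(1 + prefR (x2 :: xs'') = (((x :: x2 :: xs'').length : ℕ) : Int) ∧ (x :: x2 :: xs'').head? = ys.head?) := by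
                intro hcon
                apply hc2
                refine ⟨?_, ?_⟩
                · have := hcon.1
                  simp only [List.length_cons] at this ⊢
                  push_cast at this ⊢
                  omega
                · have := hcon.2
                  simp only [List.head?_cons] at this ⊢
                  rw [hc.2]
                  exact this
              rw [if_neg hc2, if_neg hbig]
          · rw [if_neg hc, if_neg hc]
            have hbig : ¬((if x.isSome then (1 : Int) else 0) = (((x :: x2 :: xs'').length : ℕ) : Int) ∧ (x :: x2 :: xs'').head? = ys.head?) := by
              intro hcon
              have := hcon.1
              split at this <;> simp at this <;> omega
            rw [if_neg hbig]

theorem sufR_append (xs ys : List (Option String)) (hx : xs ≠ []) (hy : ys ≠ []) :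
    sufR (xs ++ ys) =
      if sufR ys = (ys.length : Int) ∧ ys.getLast? = xs.getLast? then (ys.length : Int) + sufR xs
      else sufR ys := by
  unfold sufR
  rw [List.reverse_append, prefR_append ys.reverse xs.reverse (by simpa) (by simpa)]
  simp [List.head?_reverse]

theorem const_sufR (x : Option String) (hx : x.isSome) (l : List (Option String))
    (hl : l ≠ []) (h : ∀ k ∈ l, k = x) : sufR l = (l.length : Int) := by
  unfold sufR
  rw [const_prefR x hx l.reverse (by simpa) (fun k hk => h k (List.mem_reverse.mp hk))]
  simp

theorem suf_full (l : List (Option String)) (hl : l ≠ []) (h : sufR l = (l.length : Int)) :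
    ∃ g, l.getLast? = some g ∧ g.isSome ∧ ∀ k ∈ l, k = g := by
  obtain ⟨h0, rest, hrev⟩ : ∃ h0 rest, l.reverse = h0 :: rest := by
    cases hrev : l.reverse with
    | nil => exact absurd (by simpa using congrArg List.reverse hrev) hl
    | cons a b => exact ⟨a, b, rfl⟩
  unfold sufR at h
  rw [hrev] at h
  have hlen : rest.length + 1 = l.length := by
    have := congrArg List.length hrev
    simp at this
    omega
  obtain ⟨hs, hall⟩ := pref_full_cons h0 rest (by rw [h, ← hlen]; push_cast; ring)
  refine ⟨h0, ?_, hs, ?_⟩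
  · rw [← List.head?_reverse, hrev]
    rfl
  · intro k hk
    have hk2 : k ∈ l.reverse := List.mem_reverse.mpr hk
    rw [hrev] at hk2
    rcases List.mem_cons.mp hk2 with rfl | hk2
    · rfl
    · exact hall k hk2

def crossL (xs ys : List (Option String)) : Int :=
  match xs.getLast?, ys.head? with
  | some (some s), some (some t) => if s = t then sufR xs + prefR ys else 0
  | _, _ => 0

theorem bestR_append (xs ys : List (Option String)) (hx : xs ≠ []) (hy : ys ≠ []) :
    bestR (xs ++ ys) = max (max (bestR xs) (bestR ys)) (crossL xs ys) := by
  induction xs with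
  | nil => simp at hx
  | cons x xs' ih =>
      cases xs' with
      | nil =>
          cases ys with
          | nil => simp at hy
          | cons k ys' =>
              have h1 := prefR_le_bestR (k :: ys')
              have h2 := prefR_nonneg (k :: ys')
              have h3 := bestR_nonneg (k :: ys')
              simp only [List.cons_append, List.nil_append]
              rw [show bestR (x :: k :: ys') = max (prefR (x :: k :: ys')) (bestR (k :: ys')) from rfl,
                prefR_cons_cons]
              cases x with
              | none =>
                  simp [crossL, bestR, prefR]
              | some s =>
                  cases k with
                  | none =>
                      simp [crossL, bestR, prefR, sufR]
                  | some t =>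
                      by_cases hst : t = s
                      · subst hst
                        simp [crossL, bestR, prefR, sufR]
                        simp only [max_def]
                        split_ifs <;> omega
                      · simp [crossL, bestR, prefR, sufR, show ¬(some t = some s) from by simp [hst],
                          show ¬(s = t) from fun h => hst h.symm]
      | cons x2 xs'' =>
          have hne : x2 :: xs'' ≠ [] := by simp
          simp only [List.cons_append]
          rw [show bestR (x :: x2 :: (xs'' ++ ys)) = max (prefR ((x :: x2 :: xs'') ++ ys)) (bestR ((x2 :: xs'') ++ ys)) from rfl,
            ih hne,
            prefR_append (x :: x2 :: xs'') ys (by simp) hy,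
            show bestR (x :: x2 :: xs'') = max (prefR (x :: x2 :: xs'')) (bestR (x2 :: xs'')) from rfl]
          have hgl : (x :: x2 :: xs'').getLast? = (x2 :: xs'').getLast? := List.getLast?_cons_cons
          have hnn1 := prefR_nonneg ys
          have hnn2 := bestR_nonneg (x2 :: xs'')
          have hnn3 := bestR_nonneg ys
          have hpy := prefR_le_bestR ys
          by_cases hC : prefR (x :: x2 :: xs'') = ((x :: x2 :: xs'').length : Int) ∧ (x :: x2 :: xs'').head? = ys.head?
          · rw [if_pos hC]
            obtain ⟨hxs, hall⟩ := pref_full_cons x (x2 :: xs'')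
              (by have h := hC.1; simp only [List.length_cons] at h ⊢; push_cast at h ⊢; omega)
            obtain ⟨sx, rfl⟩ := Option.isSome_iff_exists.mp hxs
            have hprefT : prefR (x2 :: xs'') = (((x2 :: xs'').length : ℕ) : Int) := const_prefR (some sx) rfl _ hne hall
            have hlastX : (some sx :: x2 :: xs'').getLast? = some (some sx) := const_getLast _ _ hall
            have hlastT : (x2 :: xs'').getLast? = some (some sx) := by rw [← hgl]; exact hlastX
            have hsufX : sufR (some sx :: x2 :: xs'') = (((some sx :: x2 :: xs'').length : ℕ) : Int) :=
              const_sufR (some sx) rfl _ (by simp) (fun k hk => (List.mem_cons.mp hk).elim id (hall k))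
            have hsufT : sufR (x2 :: xs'') = (((x2 :: xs'').length : ℕ) : Int) := const_sufR (some sx) rfl _ hne hall
            have hysh : ys.head? = some (some sx) := by have h := hC.2; simpa using h.symm
            have hcrX : crossL (some sx :: x2 :: xs'') ys = sufR (some sx :: x2 :: xs'') + prefR ys := by
              simp [crossL, hlastX, hysh]
            have hcrT : crossL (x2 :: xs'') ys = sufR (x2 :: xs'') + prefR ys := by
              simp [crossL, hlastT, hysh]
            have hbT : (((x2 :: xs'').length : ℕ) : Int) ≤ bestR (x2 :: xs'') := hprefT ▸ prefR_le_bestR (x2 :: xs'')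
            rw [hcrX, hcrT, hsufX, hsufT, hC.1]
            simp only [List.length_cons] at *
            push_cast at *
            simp only [max_def]
            split_ifs <;> omega
          · rw [if_neg hC]
            rcases hT : (x2 :: xs'').getLast? with _ | g
            · have hsome : ((x2 :: xs'').getLast?).isSome := List.getLast?_isSome.mpr (by simp)
              rw [hT] at hsome
              simp at hsome
            · obtain ⟨k, ys', rfl⟩ : ∃ k ys', ys = k :: ys' := by
                cases ys with
                | nil => simp at hy
                | cons a b => exact ⟨a, b, rfl⟩
              have hACgoal : ∀ cr : Int,
                  max (prefR (x :: x2 :: xs'')) (max (max (bestR (x2 :: xs'')) (bestR (k :: ys'))) cr) =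
                  max (max (max (prefR (x :: x2 :: xs'')) (bestR (x2 :: xs''))) (bestR (k :: ys'))) cr := by
                intro cr
                simp only [max_def]
                split_ifs <;> omega
              rcases g with _ | t
              · rw [show crossL (x :: x2 :: xs'') (k :: ys') = 0 from by simp [crossL, hgl, hT],
                  show crossL (x2 :: xs'') (k :: ys') = 0 from by simp [crossL, hT]]
                exact hACgoal 0
              · rcases k with _ | tk
                · rw [show crossL (x :: x2 :: xs'') (none :: ys') = 0 from by simp [crossL, hgl, hT],
                    show crossL (x2 :: xs'') (none :: ys') = 0 from by simp [crossL, hT]]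
                  exact hACgoal 0
                · by_cases htt : t = tk
                  · subst htt
                    have hcrX : crossL (x :: x2 :: xs'') (some t :: ys') = sufR (x :: x2 :: xs'') + prefR (some t :: ys') := by
                      simp [crossL, hgl, hT]
                    have hcrT : crossL (x2 :: xs'') (some t :: ys') = sufR (x2 :: xs'') + prefR (some t :: ys') := by
                      simp [crossL, hT]
                    by_cases hfull : sufR (x2 :: xs'') = (((x2 :: xs'').length : ℕ) : Int) ∧ (x2 :: xs'').getLast? = some x
                    · exfalso
                      apply hC
                      obtain ⟨g, hg, hgs, hallT⟩ := suf_full (x2 :: xs'') hne hfull.1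
                      have hgx : g = x := by
                        rw [hfull.2] at hg
                        exact (Option.some_injective _ hg).symm
                      have hxt : x = some t := by
                        rw [hfull.2] at hT
                        exact Option.some_injective _ hT
                      constructor
                      · exact const_prefR x (by rw [hxt]; rfl) _ (by simp)
                          (fun k hk => (List.mem_cons.mp hk).elim id (fun hk2 => by rw [hallT k hk2, hgx]))
                      · simp [hxt]
                    · have hsX : sufR (x :: x2 :: xs'') = sufR (x2 :: xs'') := by
                        rw [show (x :: x2 :: xs'') = [x] ++ (x2 :: xs'') from rfl,
                          sufR_append [x] (x2 :: xs'') (by simp) hne, if_neg ?_]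
                        intro hcon
                        exact hfull ⟨hcon.1, by simpa using hcon.2⟩
                      rw [hcrX, hcrT, hsX]
                      exact hACgoal _
                  · rw [show crossL (x :: x2 :: xs'') (some tk :: ys') = 0 from by simp [crossL, hgl, hT, htt],
                      show crossL (x2 :: xs'') (some tk :: ys') = 0 from by simp [crossL, hT, htt]]
                    exact hACgoal 0

-- B's divide and conquer computes exactly these summaries
theorem pvSolve_spec : ∀ (n : ℕ) (ks : List (Option String)), ks.length = n → ∀ f l,
    ks.head? = some f → ks.getLast? = some l →
    pvSolve ks = (bestR ks, prefR ks, sufR ks, f, l) := by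
  intro n
  induction n using Nat.strong_induction_on with
  | _ n ih =>
      intro ks hn f l hf hl
      match ks with
      | [] => simp at hf
      | [k] =>
          simp at hf hl
          subst hf
          subst hl
          simp [pvSolve, bestR, prefR, sufR]
          cases k <;> simp
      | k1 :: k2 :: rest =>
          -- split point and halves
          have hlen : (k1 :: k2 :: rest).length = n := hn
          set L := (k1 :: k2 :: rest).take ((k1 :: k2 :: rest).length / 2) with hLdef
          set R := (k1 :: k2 :: rest).drop ((k1 :: k2 :: rest).length / 2) with hRdef
          have hsplit : L ++ R = k1 :: k2 :: rest := List.take_append_drop _ _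
          have hlen2 : (k1 :: k2 :: rest).length = rest.length + 2 := by simp
          have hLlen : L.length = (rest.length + 2) / 2 := by
            rw [hLdef, List.length_take, hlen2]
            omega
          have hRlen : R.length = rest.length + 2 - (rest.length + 2) / 2 := by
            rw [hRdef, List.length_drop, hlen2]
          have hLne : L ≠ [] := by
            intro h
            rw [h] at hLlen
            simp at hLlen
          have hRne : R ≠ [] := by
            intro h
            rw [h] at hRlen
            simp at hRlen
            omega
          have hn2 : n = rest.length + 2 := by rw [← hn, hlen2]
          have hLlt : L.length < n := by rw [hLlen, hn2]; omega
          have hRlt : R.length < n := by rw [hRlen, hn2]; omega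
          -- heads and lasts of the halves
          obtain ⟨fL, hfL⟩ := Option.isSome_iff_exists.mp (List.isSome_head?.mpr hLne)
          obtain ⟨lL, hlL⟩ := Option.isSome_iff_exists.mp (List.getLast?_isSome.mpr hLne)
          obtain ⟨fR, hfR⟩ := Option.isSome_iff_exists.mp (List.isSome_head?.mpr hRne)
          obtain ⟨lR, hlR⟩ := Option.isSome_iff_exists.mp (List.getLast?_isSome.mpr hRne)
          have hIHL := ih L.length hLlt L rfl fL lL hfL hlL
          have hIHR := ih R.length hRlt R rfl fR lR hfR hlR
          -- the borders of the whole list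
          have hfks : f = fL := by
            have : (L ++ R).head? = some f := by rw [hsplit]; exact hf
            rw [List.head?_append_of_ne_nil _ hLne] at this
            rw [hfL] at this
            exact (Option.some_injective _ this).symm
          have hlks : l = lR := by
            have : (L ++ R).getLast? = some l := by rw [hsplit]; exact hl
            rw [List.getLast?_append_of_ne_nil _ hRne] at this
            rw [hlR] at this
            exact (Option.some_injective _ this).symm
          -- unfold one step of pvSolve
          rw [show pvSolve (k1 :: k2 :: rest) =
              (match pvSolve L, pvSolve R with
              | (bl, pl, sl, fl, ll), (br, pr, sr, fr, lr) =>
                  let cross : Int := if ll.isSome ∧ ll = fr then sl + pr else 0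
                  let pref : Int := if pl = (L.length : Int) ∧ fl = fr then pl + pr else pl
                  let suf : Int := if sr = (R.length : Int) ∧ lr = ll then sl + sr else sr
                  (max (max bl br) cross, pref, suf, fl, lr)) from by rw [pvSolve]]
          rw [hIHL, hIHR]
          simp only []
          -- translate the three combine conditions
          have hcross : (if lL.isSome ∧ lL = fR then sufR L + prefR R else 0) = crossL L R := by
            unfold crossL
            rw [hlL, hfR]
            rcases lL with _ | t <;> rcases fR with _ | t' <;> simp
          have hpref : (if prefR L = (L.length : Int) ∧ fL = fR then prefR L + prefR R else prefR L) = prefR (L ++ R) := by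
            rw [prefR_append L R hLne hRne, hfL, hfR]
            by_cases h1 : prefR L = (L.length : Int)
            · simp [h1]
            · simp [h1]
          have hsuf : (if sufR R = (R.length : Int) ∧ lR = lL then sufR L + sufR R else sufR R) = sufR (L ++ R) := by
            rw [sufR_append L R hLne hRne, hlL, hlR]
            by_cases h1 : sufR R = (R.length : Int)
            · by_cases h2 : lR = lL
              · simp [h1, h2, Int.add_comm]
              · simp [h1, h2]
            · simp [h1]
          rw [hcross, hpref, hsuf, ← bestR_append L R hLne hRne, hsplit, hfks, hlks]

-- A's step depends on the signal only through pvKey, and pvKey matches B's key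
def pvStepK (st : Int × Int × Option String) (k : Option String) : Int × Int × Option String :=
  match k with
  | none => (0, st.2.1, none)
  | some s =>
      let current := if some s = st.2.2 then st.1 + 1 else 1
      (current, max st.2.1 current, some s)

theorem pvStepA_eq_stepK (st : Int × Int × Option String) (signal : List (String × String)) :
    pvStepA st signal = pvStepK st (pvKey signal) := by
  unfold pvStepA pvKey pvStepK
  by_cases h1 : PySem.Str.lower (PySem.Str.strip ((PySem.Dict.mk signal).getD "action_type" "")) ≠ "tool_call"
  · simp [h1]
  · simp only [if_neg h1]
    by_cases h2 : PySem.Str.lower (PySem.Str.strip ((PySem.Dict.mk signal).getD "action_signature" "")) = ""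
    · simp [h2]
    · simp [h2]

theorem sufR_nonneg (l : List (Option String)) : 0 ≤ sufR l := prefR_nonneg _

theorem sufR_snoc (p : List (Option String)) (k : Option String) :
    sufR (p ++ [k]) = if k.isSome ∧ p.getLast? = some k then sufR p + 1 else (if k.isSome then 1 else 0) := by
  unfold sufR
  rw [show (p ++ [k]).reverse = k :: p.reverse from by simp]
  rw [show p.getLast? = p.reverse.head? from List.head?_reverse.symm]
  rcases hp : p.reverse with _ | ⟨q, t⟩
  · simp [prefR]
  · cases k with
    | none => simp [prefR_cons_cons]
    | some s =>
        simp only [prefR_cons_cons, Option.isSome_some, true_and, List.head?_cons]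
        by_cases hqk : q = some s
        · simp [hqk]
          omega
        · simp [hqk]

theorem bestR_snoc (p : List (Option String)) (k : Option String) :
    bestR (p ++ [k]) = max (bestR p) (sufR (p ++ [k])) := by
  by_cases hp : p = []
  · subst hp
    simp only [List.nil_append]
    rw [show bestR [k] = max (prefR [k]) 0 from rfl,
      show sufR [k] = prefR [k] from by unfold sufR; simp,
      show bestR ([] : List (Option String)) = 0 from rfl]
    exact max_comm _ _
  · rw [bestR_append p [k] hp (by simp), sufR_snoc]
    have hbp := bestR_nonneg p
    have hsp := sufR_nonneg p
    cases k with
    | none =>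
        rw [show bestR [(none : Option String)] = 0 from rfl,
          show crossL p [none] = 0 from by
            unfold crossL
            rcases p.getLast? with _ | g
            · simp
            · rcases g with _ | t <;> simp]
        simp only [Option.isSome_none, Bool.false_eq_true, false_and, if_false]
        simp only [max_def]
        split_ifs <;> omega
    | some s =>
        rw [show bestR [some s] = 1 from by rw [show bestR [some s] = max (prefR [some s]) 0 from rfl]; simp [prefR]]
        rcases hg : p.getLast? with _ | g
        · rw [show crossL p [some s] = 0 from by unfold crossL; rw [hg]]
          rw [if_neg (by simp)]
          simp only [Option.isSome_some, if_true, max_def]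
          split_ifs <;> omega
        · rcases g with _ | t
          · rw [show crossL p [some s] = 0 from by unfold crossL; rw [hg]]
            rw [if_neg (by simp)]
            simp only [Option.isSome_some, if_true, max_def]
            split_ifs <;> omega
          · by_cases hts : t = s
            · subst hts
              rw [show crossL p [some t] = sufR p + prefR [some t] from by unfold crossL; rw [hg]; simp,
                show prefR [some t] = 1 from by simp [prefR]]
              have hcnd : ((some t : Option String).isSome = true ∧ (some (some t) : Option (Option String)) = some (some t)) := ⟨rfl, rfl⟩
              rw [if_pos hcnd]
              simp only [max_def]
              split_ifs <;> omega
            · rw [show crossL p [some s] = 0 from by unfold crossL; rw [hg]; simp [fun h => hts h]]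
              rw [if_neg (by simp; intro h; exact hts h)]
              simp only [Option.isSome_some, if_true, max_def]
              split_ifs <;> omega

-- A's fold state after a prefix p of keys = (suffix run of p, best run of p, last key of p)
theorem foldA (p : List (Option String)) :
    p.foldl pvStepK (0, 0, none) = (sufR p, bestR p, p.getLast?.getD none) := by
  induction p using List.reverseRecOn with
  | nil => rfl
  | append_singleton p k ih =>
      rw [List.foldl_append, ih]
      simp only [List.foldl_cons, List.foldl_nil]
      rw [show (p ++ [k]).getLast? = some k from by simp]
      rw [bestR_snoc, sufR_snoc]
      cases k with
      | none =>
          simp only [pvStepK, Option.isSome_none, Bool.false_eq_true, false_and, if_false,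
            Option.getD_some]
          have h0 := bestR_nonneg p
          simp only [Prod.mk.injEq, true_and, and_true]
          exact (max_eq_left h0).symm
      | some s =>
          simp only [pvStepK, Option.isSome_some, true_and, Option.getD_some]
          have hcond : (some s = p.getLast?.getD none) ↔ (p.getLast? = some (some s)) := by
            rcases hg : p.getLast? with _ | g
            · simp
            · rcases g with _ | t <;> simp [eq_comm]
          by_cases hc : p.getLast? = some (some s)
          · rw [if_pos (hcond.mpr hc), if_pos hc]
          · rw [if_neg (fun h => hc (hcond.mp h)), if_neg hc]
            simp

-- ===== VERDICT (by name: the statement is the Claim_ definition above) =====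
theorem max_repeated_tool_calls_py_spec : Claim_equal_max_repeated_tool_calls_py := by
  intro signals _
  unfold Spec_max_repeated_tool_calls_py max_repeated_tool_calls_py max_repeated_tool_calls_py_alt
  have hstep : pvStepA = fun st sig => pvStepK st (pvKey sig) :=
    funext fun st => funext fun sig => pvStepA_eq_stepK st sig
  rw [hstep, ← List.foldl_map, foldA]
  cases hks : signals.map pvKey with
  | nil => simp [bestR]
  | cons k rest =>
      obtain ⟨l, hl⟩ := Option.isSome_iff_exists.mp
        (List.getLast?_isSome.mpr (show (k :: rest) ≠ [] by simp))
      rw [pvSolve_spec (k :: rest).length (k :: rest) rfl k l rfl hl]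
      simp
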